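-- pv_equiv track=rewrite | github.com/Atituiset/event-loop-agent | orchestrator.py | _filter_by_cared_paths
-- ===== SOURCE A (Python) =====
-- def _filter_by_cared_paths(file_paths: list[str], cared_paths: list[str]) -> list[str]:
--     """过滤出路径前缀匹配 cared_paths 的文件（精确匹配，避免误判）"""
--     normalized_cared = [cp.rstrip("/") for cp in cared_paths]
--     filtered = []
--     for fp in file_paths:
--         for cp in normalized_cared:
--             if fp == cp or fp.startswith(cp + "/"):
--                 filtered.append(fp)
--                 break
--     return filtered
-- ===== SOURCE B (Python) =====
-- def _filter_by_cared_paths(file_paths: list[str], cared_paths: list[str]) -> list[str]: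
--     """Same filter via a prebuilt set of normalized cared paths, probed with each
--     file path's own slash-prefixes (no scan over cared_paths per file)."""
--     cared = {cp.rstrip("/") for cp in cared_paths}
--     out = []
--     for fp in file_paths:
--         if fp in cared or any(
--             ch == "/" and fp[:i] in cared for i, ch in enumerate(fp)
--         ):
--             out.append(fp)
--     return out
-- ===== Notes on version B (the rewrite author's own statement) =====
-- stated objective: faster
-- what changed: Instead of scanning the cared list with startswith for every file, B builds one set of normalized cared paths and tests each file's own slash-delimited prefixes for membership, removing the per-file scan over cared_paths.
import Mathlib
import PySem

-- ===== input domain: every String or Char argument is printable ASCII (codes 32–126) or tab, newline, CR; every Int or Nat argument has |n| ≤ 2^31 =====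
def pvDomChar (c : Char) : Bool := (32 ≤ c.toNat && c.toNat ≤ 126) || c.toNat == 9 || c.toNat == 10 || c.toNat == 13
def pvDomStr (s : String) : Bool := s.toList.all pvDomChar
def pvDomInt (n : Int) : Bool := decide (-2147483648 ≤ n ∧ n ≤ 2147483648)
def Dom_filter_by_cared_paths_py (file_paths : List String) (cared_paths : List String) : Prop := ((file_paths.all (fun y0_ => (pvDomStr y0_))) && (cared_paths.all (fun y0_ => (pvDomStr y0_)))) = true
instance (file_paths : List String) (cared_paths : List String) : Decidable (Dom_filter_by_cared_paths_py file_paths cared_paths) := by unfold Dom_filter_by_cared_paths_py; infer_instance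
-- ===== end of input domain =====

-- B replaces A's per-file scan of cared_paths by one prebuilt set of normalized cared
-- paths probed with each file path's own slash-prefixes (objective: faster for many cared paths).

-- exact port of s.rstrip("/"): drop the trailing '/' characters (used by both Pythons)
def pvRstripSlash (s : String) : List Char := ((s.toList.reverse).dropWhile (fun c => c == '/')).reverse

-- ===== PORT A =====
-- inner 'for cp in normalized_cared: if fp == cp or fp.startswith(cp + "/"): …; break'
def pvInnerA (fp : List Char) : List (List Char) → Bool
  | [] => false
  | cp :: rest =>
      if fp == cp || PySem.Chars.startswith fp (cp ++ ['/']) then true else pvInnerA fp rest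

def filter_by_cared_paths_py (file_paths : List String) (cared_paths : List String) : List String :=
  let normalized_cared := cared_paths.map (fun cp => pvRstripSlash cp)
  file_paths.foldl (fun filtered fp =>
    if pvInnerA fp.toList normalized_cared then filtered ++ [fp] else filtered) []

-- ===== PORT B =====
-- '[fp[:i] for i, ch in enumerate(fp) if ch == "/"]' — the proper prefixes of fp ending just before a '/'
def pvSlashPrefixes : List Char → List (List Char)
  | [] => []
  | c :: rest => (if c = '/' then [([] : List Char)] else []) ++ (pvSlashPrefixes rest).map (c :: ·)

def filter_by_cared_paths_py_alt (file_paths : List String) (cared_paths : List String) : List String :=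
  let cared : PySem.Set (List Char) := PySem.Set.ofList (cared_paths.map (fun cp => pvRstripSlash cp))
  file_paths.foldl (fun out fp =>
    if cared.contains fp.toList || (pvSlashPrefixes fp.toList).any (fun p => cared.contains p)
    then out ++ [fp] else out) []

-- ===== PRECONDITION & SPEC =====
def Spec_filter_by_cared_paths_py (file_paths : List String) (cared_paths : List String) (out : List String) : Prop := out = filter_by_cared_paths_py_alt file_paths cared_paths
instance (file_paths : List String) (cared_paths : List String) (out : List String) : Decidable (Spec_filter_by_cared_paths_py file_paths cared_paths out) := by unfold Spec_filter_by_cared_paths_py; infer_instance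

-- ===== CLAIM (what is proved, stated in full; the proofs are below) =====
def Claim_equal_filter_by_cared_paths_py : Prop := ∀ (file_paths : List String) (cared_paths : List String), Dom_filter_by_cared_paths_py file_paths cared_paths → Spec_filter_by_cared_paths_py file_paths cared_paths (filter_by_cared_paths_py file_paths cared_paths)

-- ===== LEMMAS AND PROOFS =====

-- p is a slash-prefix of cs iff p followed by '/' is a prefix of cs
theorem mem_pvSlashPrefixes (p cs : List Char) : p ∈ pvSlashPrefixes cs ↔ p ++ ['/'] <+: cs := by
  induction cs generalizing p with
  | nil => simp [pvSlashPrefixes]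
  | cons c rest ih =>
    cases p with
    | nil =>
      simp [pvSlashPrefixes, List.cons_prefix_cons, eq_comm]
    | cons c' p' =>
      simp only [pvSlashPrefixes, List.mem_append, List.mem_ite_nil_right, List.mem_singleton,
        List.mem_map, List.cons_append, List.cons_prefix_cons, ih]
      constructor
      · rintro (⟨-, h⟩ | ⟨q, hq, h2⟩)
        · exact absurd h (by simp)
        · injection h2 with e1 e2
          subst e1; subst e2
          exact ⟨rfl, hq⟩
      · rintro ⟨rfl, h⟩
        exact Or.inr ⟨p', h, rfl⟩

-- characterisation of A's inner loop (the 'break' scan is an existential over the cared list)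
theorem pvInnerA_true_iff (fp : List Char) (norm : List (List Char)) :
    pvInnerA fp norm = true ↔ ∃ cp ∈ norm, fp = cp ∨ cp ++ ['/'] <+: fp := by
  induction norm with
  | nil => simp [pvInnerA]
  | cons cp rest ih =>
    simp only [pvInnerA]
    by_cases h : (fp == cp || PySem.Chars.startswith fp (cp ++ ['/'])) = true
    · simp only [if_pos h, true_iff]
      rw [Bool.or_eq_true] at h
      rcases h with h | h
      · exact ⟨cp, List.mem_cons_self, Or.inl (beq_iff_eq.mp h)⟩
      · exact ⟨cp, List.mem_cons_self, Or.inr ((PySem.Chars.startswith_iff _ _).mp h)⟩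
    · rw [if_neg h, ih]
      constructor
      · rintro ⟨q, hq, hcond⟩; exact ⟨q, List.mem_cons_of_mem _ hq, hcond⟩
      · rintro ⟨q, hq, hcond⟩
        rcases List.mem_cons.mp hq with rfl | hq'
        · exfalso; apply h
          rcases hcond with rfl | hpre
          · simp
          · simp [PySem.Chars.startswith_iff, hpre]
        · exact ⟨q, hq', hcond⟩

-- A's inner loop over the cared list tests the same condition as B's probe of the set
theorem pvInnerA_eq (fp : List Char) (norm : List (List Char)) :
    pvInnerA fp norm =
      ((PySem.Set.ofList norm).contains fp ||
        (pvSlashPrefixes fp).any (fun p => (PySem.Set.ofList norm).contains p)) := by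
  rw [Bool.eq_iff_iff, pvInnerA_true_iff]
  have hmem : ∀ x : List Char, (PySem.Set.ofList norm).contains x = true ↔ x ∈ norm := by
    intro x; simp [PySem.Set.mem_ofList]
  simp only [Bool.or_eq_true, List.any_eq_true, hmem, mem_pvSlashPrefixes]
  constructor
  · rintro ⟨cp, hcp, rfl | hpre⟩
    · exact Or.inl hcp
    · exact Or.inr ⟨cp, hpre, hcp⟩
  · rintro (h | ⟨p, hp, hpn⟩)
    · exact ⟨fp, h, Or.inl rfl⟩
    · exact ⟨p, hpn, Or.inr hp⟩

-- ===== VERDICT (by name: the statement is the Claim_ definition above) =====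
theorem filter_by_cared_paths_py_spec : Claim_equal_filter_by_cared_paths_py := by
  intro file_paths cared_paths _
  unfold Spec_filter_by_cared_paths_py filter_by_cared_paths_py filter_by_cared_paths_py_alt
  simp only [pvInnerA_eq]
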